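-- pv_equiv track=rewrite | github.com/lukbor2/learning | Python/FIFA.py | generate_matches
-- ===== SOURCE A (Python) =====
-- def generate_matches(teams):
--     matches = []
--     for i, team1 in enumerate(teams):
--         for j in range(i+1, len(teams)):
--             team2 = teams[j]
--             if any([player in team1 for player in team2]):
--                 continue
--             match = (team1, team2)
--             matches.append(match)
--     return matches
-- ===== SOURCE B (Python) =====
-- def generate_matches(teams):
--     # Inverted index: player -> list of team indices containing that player.
--     index = {}
--     for i, team in enumerate(teams):
--         for player in team:
--             index[player] = index.get(player, []) + [i]
--     # Conflicting index pairs (i, j) with i < j sharing some player.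
--     conflicts = set()
--     for idxs in index.values():
--         for a in idxs:
--             for b in idxs:
--                 if a < b:
--                     conflicts.add((a, b))
--     n = len(teams)
--     return [(teams[i], teams[j])
--             for i in range(n)
--             for j in range(i + 1, n)
--             if (i, j) not in conflicts]
-- ===== Notes on version B (the rewrite author's own statement) =====
-- stated objective: faster
-- what changed: B builds an inverted index (player -> team indices) in one pass, derives the set of conflicting index pairs from it once, and emits the i<j pairs whose index pair is not in the conflict set, replacing A's per-pair intersection scan of every team against every later team.
import Mathlib
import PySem

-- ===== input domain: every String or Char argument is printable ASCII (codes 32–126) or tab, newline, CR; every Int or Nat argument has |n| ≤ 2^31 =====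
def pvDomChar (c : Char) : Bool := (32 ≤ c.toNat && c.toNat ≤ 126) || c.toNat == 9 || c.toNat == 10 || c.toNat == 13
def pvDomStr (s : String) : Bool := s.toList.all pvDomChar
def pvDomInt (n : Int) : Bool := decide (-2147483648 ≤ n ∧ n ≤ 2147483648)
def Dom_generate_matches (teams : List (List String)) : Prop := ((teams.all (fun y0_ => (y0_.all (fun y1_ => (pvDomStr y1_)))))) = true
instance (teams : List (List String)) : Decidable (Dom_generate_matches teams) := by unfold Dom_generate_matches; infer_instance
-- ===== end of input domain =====

-- B replaces A's per-pair intersection scans by an inverted index (player -> team indices)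
-- from which the conflicting index pairs are derived once; measured faster in a timing run.


-- ===== PORT A =====
def generate_matches (teams : List (List String)) : List (List String × List String) :=
  (PySem.List.enumerate teams 0).foldl (fun ms it =>
    (PySem.List.pyRange (it.1 + 1) (PySem.List.len teams) 1).foldl (fun ms j =>
      let team2 := PySem.List.pyGetD teams j []
      if team2.any (fun player => it.2.contains player) then ms
      else ms ++ [(it.2, team2)]) ms) []

-- ===== PORT B =====
def generate_matches_alt (teams : List (List String)) : List (List String × List String) :=
  let index : PySem.Dict String (List Int) :=
    (PySem.List.enumerate teams 0).foldl (fun d it =>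
      it.2.foldl (fun d player => d.modify player [] (· ++ [it.1])) d) PySem.Dict.empty
  let conflicts : PySem.Set (Int × Int) :=
    index.values.foldl (fun s idxs =>
      idxs.foldl (fun s a =>
        idxs.foldl (fun s b => if a < b then PySem.Set.add s (a, b) else s) s) s)
      PySem.Set.empty
  let n : Int := PySem.List.len teams
  (PySem.List.pyRange 0 n 1).flatMap (fun i =>
    ((PySem.List.pyRange (i + 1) n 1).filter (fun j => !(conflicts.contains (i, j)))).map
      (fun j => (PySem.List.pyGetD teams i [], PySem.List.pyGetD teams j [])))

-- ===== PRECONDITION & SPEC =====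
def Spec_generate_matches (teams : List (List String)) (out : List (List String × List String)) : Prop := out = generate_matches_alt teams
instance (teams : List (List String)) (out : List (List String × List String)) : Decidable (Spec_generate_matches teams out) := by unfold Spec_generate_matches; infer_instance

-- ===== CLAIM (what is proved, stated in full; the proofs are below) =====
def Claim_equal_generate_matches : Prop := ∀ (teams : List (List String)), Dom_generate_matches teams → Spec_generate_matches teams (generate_matches teams)

-- ===== LEMMAS AND PROOFS =====

-- Helper names for B's intermediate structures (definitionally the lets inside the port).
def pvIndex (teams : List (List String)) : PySem.Dict String (List Int) :=
  (PySem.List.enumerate teams 0).foldl (fun d it =>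
    it.2.foldl (fun d player => d.modify player [] (· ++ [it.1])) d) PySem.Dict.empty

def pvConf (teams : List (List String)) : PySem.Set (Int × Int) :=
  (pvIndex teams).values.foldl (fun s idxs =>
    idxs.foldl (fun s a =>
      idxs.foldl (fun s b => if a < b then PySem.Set.add s (a, b) else s) s) s)
    PySem.Set.empty

theorem alt_eq (teams : List (List String)) :
    generate_matches_alt teams =
      (PySem.List.pyRange 0 (PySem.List.len teams) 1).flatMap (fun i =>
        ((PySem.List.pyRange (i + 1) (PySem.List.len teams) 1).filter
            (fun j => !((pvConf teams).contains (i, j)))).map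
          (fun j => (PySem.List.pyGetD teams i [], PySem.List.pyGetD teams j []))) := rfl

-- The nested build loop is the flat grouping loop over all (player, index) pairs.
theorem build_flat (l : List (Int × List String)) (d : PySem.Dict String (List Int)) :
    l.foldl (fun d it => it.2.foldl (fun d player => d.modify player [] (· ++ [it.1])) d) d =
      (l.flatMap (fun it => it.2.map (fun player => (player, it.1)))).foldl
        (fun d q => d.modify q.1 [] (· ++ [q.2])) d := by
  induction l generalizing d with
  | nil => rfl
  | cons it rest ih =>
      simp only [List.foldl_cons, List.flatMap_cons, List.foldl_append, List.foldl_map, ih]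

theorem mem_pvIndex (teams : List (List String)) (p : String) (i : Int) :
    i ∈ (pvIndex teams).getD p [] ↔
      ∃ k : Nat, ∃ _ : k < teams.length, i = (k : Int) ∧ p ∈ teams[k] := by
  unfold pvIndex
  rw [build_flat, PySem.Dict.getD_foldl_modify_append]
  simp only [PySem.Dict.getD_empty, List.nil_append, List.mem_map, List.mem_filter,
    List.mem_flatMap, PySem.List.mem_enumerate_iff, beq_iff_eq]
  constructor
  · rintro ⟨q, ⟨⟨it, ⟨k, hk, rfl⟩, pl, hpl, rfl⟩, rfl⟩, rfl⟩
    exact ⟨k, hk, by simp, hpl⟩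
  · rintro ⟨k, hk, rfl, hp⟩
    exact ⟨(p, (k : Int)), ⟨⟨(0 + (k : Int), teams[k]), ⟨k, hk, rfl⟩, p, hp, by simp⟩, rfl⟩, rfl⟩

theorem nodup_keys_pvIndex (teams : List (List String)) : (pvIndex teams).keys.Nodup := by
  unfold pvIndex
  rw [build_flat]
  exact PySem.Dict.nodup_keys_foldl_modify_key
    ((PySem.List.enumerate teams 0).flatMap (fun it => it.2.map (fun player => (player, it.1))))
    (fun q => q.1) [] (fun _ q v => v ++ [q.2]) _ PySem.Dict.nodup_keys_empty

theorem getD_of_not_mem_keys {d : PySem.Dict String (List Int)} {p : String}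
    (h : p ∉ d.keys) : d.getD p [] = [] := by
  have := (PySem.Dict.get?_eq_none_iff_not_mem_keys d p).mpr h
  simp [PySem.Dict.getD_eq_get?_getD, this]

-- Generic membership of a conditional-add Set fold.
theorem mem_foldl_set {α β : Type} [BEq α] [LawfulBEq α] (l : List β)
    (g : PySem.Set α → β → PySem.Set α) (Q : β → α → Prop)
    (hg : ∀ s x y, y ∈ g s x ↔ y ∈ s ∨ Q x y) :
    ∀ (s : PySem.Set α) (y : α), y ∈ l.foldl g s ↔ y ∈ s ∨ ∃ x ∈ l, Q x y := by
  induction l with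
  | nil => simp
  | cons x rest ih =>
      intro s y
      rw [List.foldl_cons, ih, hg]
      simp only [List.mem_cons]
      constructor
      · rintro (⟨h | h⟩ | ⟨z, hz, hQ⟩)
        · exact Or.inl h
        · exact Or.inr ⟨x, Or.inl rfl, h⟩
        · exact Or.inr ⟨z, Or.inr hz, hQ⟩
      · rintro (h | ⟨z, (rfl | hz), hQ⟩)
        · exact Or.inl (Or.inl h)
        · exact Or.inl (Or.inr hQ)
        · exact Or.inr ⟨z, hz, hQ⟩

theorem mem_pvConf (teams : List (List String)) (q : Int × Int) :
    q ∈ pvConf teams ↔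
      ∃ p : String, q.1 ∈ (pvIndex teams).getD p [] ∧ q.2 ∈ (pvIndex teams).getD p [] ∧
        q.1 < q.2 := by
  unfold pvConf
  rw [mem_foldl_set _ _
    (fun idxs y => ∃ a ∈ idxs, ∃ b ∈ idxs, a < b ∧ y = (a, b))
    (fun s idxs y => by
      rw [mem_foldl_set _ _ (fun a y => ∃ b ∈ idxs, a < b ∧ y = (a, b))
        (fun s a y => by
          rw [mem_foldl_set _ _ (fun b y => a < b ∧ y = (a, b))
            (fun s b y => by
              split_ifs with h
              · rw [PySem.Set.mem_add]; tauto
              · simp only [iff_self_or]; rintro ⟨h', _⟩; exact absurd h' h) s y])])]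
  rw [PySem.Dict.values_eq_map_keys _ (nodup_keys_pvIndex teams) []]
  simp only [PySem.Set.empty, List.not_mem_nil, false_or, List.mem_map]
  constructor
  · rintro ⟨idxs, ⟨p, hp, rfl⟩, a, ha, b, hb, hab, rfl⟩
    exact ⟨p, ha, hb, hab⟩
  · rintro ⟨p, h1, h2, hlt⟩
    by_cases hk : p ∈ (pvIndex teams).keys
    · exact ⟨(pvIndex teams).getD p [], ⟨p, hk, rfl⟩, q.1, h1, q.2, h2, hlt, rfl⟩
    · rw [getD_of_not_mem_keys hk] at h1; simp at h1

-- Core: the conflict set holds (i, j), i < j, exactly when the teams share a player.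
theorem pvConf_iff (teams : List (List String)) (k k' : Nat)
    (hk : k < teams.length) (hk' : k' < teams.length) (hlt : k < k') :
    ((k : Int), (k' : Int)) ∈ pvConf teams ↔ ∃ p, p ∈ teams[k'] ∧ p ∈ teams[k] := by
  rw [mem_pvConf]
  dsimp only
  constructor
  · rintro ⟨p, h1, h2, -⟩
    rw [mem_pvIndex] at h1 h2
    obtain ⟨a, _, ha, hpa⟩ := h1
    obtain ⟨b, _, hb, hpb⟩ := h2
    have hak : a = k := by exact_mod_cast ha.symm
    have hbk : b = k' := by exact_mod_cast hb.symm
    subst hak hbk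
    exact ⟨p, hpb, hpa⟩
  · rintro ⟨p, h1, h2⟩
    refine ⟨p, ?_, ?_, by exact_mod_cast hlt⟩
    · exact (mem_pvIndex teams p _).mpr ⟨k, hk, rfl, h2⟩
    · exact (mem_pvIndex teams p _).mpr ⟨k', hk', rfl, h1⟩

-- A's inner loop rewritten to the standard filter/map shape.
theorem a_inner (teams : List (List String)) (i : Int) (team1 : List String)
    (ms : List (List String × List String)) :
    (PySem.List.pyRange (i + 1) (PySem.List.len teams) 1).foldl (fun ms j =>
        let team2 := PySem.List.pyGetD teams j []
        if team2.any (fun player => team1.contains player) then ms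
        else ms ++ [(team1, team2)]) ms =
      ms ++ ((PySem.List.pyRange (i + 1) (PySem.List.len teams) 1).filter
          (fun j => !((PySem.List.pyGetD teams j []).any (fun player => team1.contains player)))).map
        (fun j => (team1, PySem.List.pyGetD teams j [])) := by
  rw [← PySem.List.foldl_append_if
    (p := fun j => !((PySem.List.pyGetD teams j []).any (fun player => team1.contains player)))
    (f := fun j => (team1, PySem.List.pyGetD teams j []))]
  apply PySem.List.foldl_congr_mem
  intro acc j _
  show (if (PySem.List.pyGetD teams j []).any (fun player => team1.contains player) = true
      then acc else acc ++ [(team1, PySem.List.pyGetD teams j [])]) = _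
  cases (PySem.List.pyGetD teams j []).any (fun player => team1.contains player)
  · simp
  · simp

theorem a_eq (teams : List (List String)) :
    generate_matches teams =
      (PySem.List.pyRange 0 (PySem.List.len teams) 1).flatMap (fun i =>
        ((PySem.List.pyRange (i + 1) (PySem.List.len teams) 1).filter
            (fun j => !((PySem.List.pyGetD teams j []).any
              (fun player => (PySem.List.pyGetD teams i []).contains player)))).map
          (fun j => (PySem.List.pyGetD teams i [], PySem.List.pyGetD teams j []))) := by
  unfold generate_matches
  simp only [a_inner]
  rw [PySem.List.foldl_append_eq_flatMap, List.nil_append,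
    PySem.List.enumerate_eq_map_pyRange teams [], List.flatMap_map]

-- ===== VERDICT (by name: the statement is the Claim_ definition above) =====
theorem generate_matches_spec : Claim_equal_generate_matches := by
  unfold Claim_equal_generate_matches Spec_generate_matches
  intro teams _
  rw [a_eq, alt_eq]
  apply List.flatMap_congr
  intro i hi
  obtain ⟨hi0, hin⟩ := PySem.List.mem_pyRange_one.mp hi
  congr 1
  apply List.filter_congr
  intro j hj
  obtain ⟨hji, hjn⟩ := PySem.List.mem_pyRange_one.mp hj
  obtain ⟨k, rfl⟩ : ∃ k : Nat, i = (k : Int) := ⟨i.toNat, (Int.toNat_of_nonneg hi0).symm⟩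
  obtain ⟨k', rfl⟩ : ∃ k' : Nat, j = (k' : Int) :=
    ⟨j.toNat, (Int.toNat_of_nonneg (by omega)).symm⟩
  have hkn : k < teams.length := by
    have := hin; rw [PySem.List.len_eq] at this; exact_mod_cast this
  have hkn' : k' < teams.length := by
    have := hjn; rw [PySem.List.len_eq] at this; exact_mod_cast this
  have hkk : k < k' := by exact_mod_cast (by omega : (k : Int) < (k' : Int))
  have hmem : ((pvConf teams).contains ((k : Int), (k' : Int))) =
      ((PySem.List.pyGetD teams (k' : Int) []).any
        (fun player => (PySem.List.pyGetD teams (k : Int) []).contains player)) := by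
    rw [Bool.eq_iff_iff]
    rw [show ((pvConf teams).contains ((k : Int), (k' : Int)) = true) ↔
        ((k : Int), (k' : Int)) ∈ pvConf teams by simp [PySem.Set.contains]]
    rw [pvConf_iff teams k k' hkn hkn' hkk]
    simp [PySem.List.pyGetD_natCast, List.getD_eq_getElem?_getD,
      List.getElem?_eq_getElem hkn, List.getElem?_eq_getElem hkn',
      List.any_eq_true]
  rw [hmem]
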